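-- pv_equiv track=rewrite | github.com/solar2ain/tivoo-control | presets/emotion_presets_luna.py | _shift_frame
-- ===== SOURCE A (Python) =====
-- _BG = (0, 0, 0)
--
-- def _blank():
--     return [[_BG] * 16 for _ in range(16)]
--
-- def _shift_frame(frame, xo=0, yo=0):
--     """Shift all pixels in a frame by offset."""
--     shifted = _blank()
--     for r in range(16):
--         for c in range(16):
--             nr, nc = r + yo, c + xo
--             if 0 <= nr < 16 and 0 <= nc < 16:
--                 shifted[nr][nc] = frame[r][c]
--     return shifted
-- ===== SOURCE B (Python) =====
-- _BG = (0, 0, 0)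
--
-- def _shift_frame(frame, xo=0, yo=0):
--     """Shift a 16x16 frame by (xo, yo) with whole-row slicing: a vertical
--     shift of the row list followed by a horizontal shift of each visible
--     row, instead of per-pixel loops."""
--     blank_row = [_BG] * 16
--     if xo >= 16 or xo <= -16 or yo >= 16 or yo <= -16:
--         return [blank_row[:] for _ in range(16)]
--
--     def hshift(row):
--         if xo >= 0:
--             return [_BG] * xo + list(row[:16 - xo])
--         return list(row[-xo:16]) + [_BG] * -xo
--
--     if yo >= 0:
--         return [blank_row[:] for _ in range(yo)] + [hshift(r) for r in frame[:16 - yo]]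
--     return [hshift(r) for r in frame[-yo:16]] + [blank_row[:] for _ in range(-yo)]
-- ===== Notes on version B (the rewrite author's own statement) =====
-- stated objective: alternative
-- what changed: Replaced A's per-pixel scatter (pre-fill a blank 16x16 grid, then a nested 16x16 loop writing each source pixel at its shifted destination) by whole-row list slicing: an off-screen guard, a vertical shift of the row list via slicing/padding, and a horizontal shift of each visible row via slicing/padding; no per-pixel loop remains.
import Mathlib
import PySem

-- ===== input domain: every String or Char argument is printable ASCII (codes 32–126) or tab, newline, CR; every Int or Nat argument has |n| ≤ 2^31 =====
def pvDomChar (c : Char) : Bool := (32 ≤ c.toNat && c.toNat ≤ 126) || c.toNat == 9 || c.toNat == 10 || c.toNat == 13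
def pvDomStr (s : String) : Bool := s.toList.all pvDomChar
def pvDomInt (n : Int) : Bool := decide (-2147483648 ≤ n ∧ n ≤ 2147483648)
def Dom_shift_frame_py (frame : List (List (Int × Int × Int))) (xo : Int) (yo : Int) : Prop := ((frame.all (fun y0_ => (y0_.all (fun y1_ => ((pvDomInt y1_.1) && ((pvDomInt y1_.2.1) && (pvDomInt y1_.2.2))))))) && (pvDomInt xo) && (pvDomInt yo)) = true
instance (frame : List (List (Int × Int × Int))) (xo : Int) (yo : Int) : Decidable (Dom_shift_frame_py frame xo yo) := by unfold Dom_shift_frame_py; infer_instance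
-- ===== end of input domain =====

-- B replaces A's per-pixel scatter loop (pre-fill a blank 16x16 grid, write each source pixel
-- at its shifted destination) by whole-row list slicing: a vertical shift of the row list,
-- then a horizontal shift of each visible row by padding/slicing; same output (alternative).

-- frame[r][c] for 0 ≤ r, c: exact via PySem.List.pyGet? (Pre_ guarantees the indices are in range)
def pvGetV (frame : List (List (Int × Int × Int))) (r c : Int) : Int × Int × Int :=
  (PySem.List.pyGet? ((PySem.List.pyGet? frame r).getD []) c).getD (0, 0, 0)

-- ===== PORT A =====
-- _blank() inlined: [[_BG]*16 for _ in range(16)]; the two for-loops are folds over range(16),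
-- shifted[nr][nc] = frame[r][c] is List.set on the row at nr (guard 0<=nr<16, 0<=nc<16 as in A)
def shift_frame_py (frame : List (List (Int × Int × Int))) (xo : Int) (yo : Int) : List (List (Int × Int × Int)) :=
  (PySem.List.pyRange 0 16 1).foldl (fun sh r =>
    (PySem.List.pyRange 0 16 1).foldl (fun sh c =>
      if 0 ≤ r + yo ∧ r + yo < 16 ∧ 0 ≤ c + xo ∧ c + xo < 16 then
        sh.set (r + yo).toNat ((sh.getD (r + yo).toNat []).set (c + xo).toNat (pvGetV frame r c))
      else sh) sh)
    (List.replicate 16 (List.replicate 16 ((0, 0, 0) : Int × Int × Int)))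

-- ===== PORT B =====
-- blank_row = [_BG] * 16
def pvBlankRow : List (Int × Int × Int) := List.replicate 16 (0, 0, 0)

-- hshift(row): [_BG]*xo + row[:16-xo]  (xo >= 0)  /  row[-xo:16] + [_BG]*-xo  (xo < 0)
def pvHShift (xo : Int) (row : List (Int × Int × Int)) : List (Int × Int × Int) :=
  if 0 ≤ xo then
    List.replicate xo.toNat (0, 0, 0) ++ PySem.List.slice row none (some (16 - xo))
  else
    PySem.List.slice row (some (-xo)) (some 16) ++ List.replicate (-xo).toNat (0, 0, 0)

-- off-screen guard, then vertical shift by slicing the row list, hshift on each visible row;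
-- [blank_row[:] for _ in range(k)] is List.replicate k pvBlankRow (value-equal copies)
def shift_frame_py_alt (frame : List (List (Int × Int × Int))) (xo : Int) (yo : Int) : List (List (Int × Int × Int)) :=
  if 16 ≤ xo ∨ xo ≤ -16 ∨ 16 ≤ yo ∨ yo ≤ -16 then
    List.replicate 16 pvBlankRow
  else if 0 ≤ yo then
    List.replicate yo.toNat pvBlankRow ++
      (PySem.List.slice frame none (some (16 - yo))).map (pvHShift xo)
  else
    (PySem.List.slice frame (some (-yo)) (some 16)).map (pvHShift xo) ++
      List.replicate (-yo).toNat pvBlankRow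

-- ===== PRECONDITION & SPEC =====
-- Pre_ excludes exactly the inputs on which A raises IndexError: some pixel (r,c) whose shifted
-- destination lands inside the 16x16 grid has no cell frame[r][c].
def Pre_shift_frame_py (frame : List (List (Int × Int × Int))) (xo : Int) (yo : Int) : Prop :=
  ∀ r : Fin 16, ∀ c : Fin 16,
    (0 ≤ (r.val : Int) + yo ∧ (r.val : Int) + yo < 16 ∧ 0 ≤ (c.val : Int) + xo ∧ (c.val : Int) + xo < 16) →
    (r.val < frame.length ∧ c.val < (frame.getD r.val []).length)
instance (frame : List (List (Int × Int × Int))) (xo : Int) (yo : Int) : Decidable (Pre_shift_frame_py frame xo yo) := by unfold Pre_shift_frame_py; infer_instance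

def pvWitness_shift_frame_py : (List (List (Int × Int × Int))) × Int × Int :=
  (List.replicate 16 (List.replicate 16 ((0, 0, 0) : Int × Int × Int)), 1, -2)

def Spec_shift_frame_py (frame : List (List (Int × Int × Int))) (xo : Int) (yo : Int) (out : List (List (Int × Int × Int))) : Prop := out = shift_frame_py_alt frame xo yo
instance (frame : List (List (Int × Int × Int))) (xo : Int) (yo : Int) (out : List (List (Int × Int × Int))) : Decidable (Spec_shift_frame_py frame xo yo out) := by unfold Spec_shift_frame_py; infer_instance

-- ===== CLAIM (what is proved, stated in full; the proofs are below) =====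
def Claim_equal_shift_frame_py : Prop := ∀ (frame : List (List (Int × Int × Int))) (xo : Int) (yo : Int), Dom_shift_frame_py frame xo yo → Pre_shift_frame_py frame xo yo → Spec_shift_frame_py frame xo yo (shift_frame_py frame xo yo)

-- ===== LEMMAS AND PROOFS =====

lemma pv_getD_set {α : Type} (l : List α) (n i : Nat) (a d : α) :
    (l.set n a).getD i d = if i = n ∧ n < l.length then a else l.getD i d := by
  simp only [List.getD, List.getElem?_set]
  split_ifs with h1 h2 h3 h3 <;> simp_all

lemma pv_mem_row {α : Type} (sh : List (List α)) (n : Nat) (hn : n < sh.length) :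
    sh.getD n [] ∈ sh := by
  rw [List.getD_eq_getElem sh [] hn]; exact List.getElem_mem hn

-- getD over the basic list shapes B builds (append / replicate / take / drop)
lemma pv_getD_append {α : Type} (l1 l2 : List α) (j : Nat) (d : α) :
    (l1 ++ l2).getD j d = if j < l1.length then l1.getD j d else l2.getD (j - l1.length) d := by
  simp only [List.getD, List.getElem?_append]
  split_ifs <;> rfl

lemma pv_getD_replicate {α : Type} (n j : Nat) (v d : α) :
    (List.replicate n v).getD j d = if j < n then v else d := by
  simp only [List.getD, List.getElem?_replicate]
  split_ifs <;> rfl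

lemma pv_getD_take {α : Type} (l : List α) (n j : Nat) (d : α) (h : j < n) :
    (l.take n).getD j d = l.getD j d := by
  simp [List.getD, h]

lemma pv_getD_drop {α : Type} (l : List α) (k j : Nat) (d : α) :
    (l.drop k).getD j d = l.getD (k + j) d := by
  simp [List.getD, List.getElem?_drop]

-- pvGetV on nonnegative indices is plain getD indexing
lemma pv_getV_nonneg (frame : List (List (Int × Int × Int))) (r c : Int)
    (hr : 0 ≤ r) (hc : 0 ≤ c) :
    pvGetV frame r c = (frame.getD r.toNat []).getD c.toNat (0, 0, 0) := by
  rw [pvGetV, PySem.List.pyGet?_of_nonneg _ hr, PySem.List.pyGet?_of_nonneg _ hc]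
  simp [List.getD]

-- inner loop (for c in range(16)) of A, characterised elementwise
lemma pv_inner (frame : List (List (Int × Int × Int))) (xo yo r : Int) (cs : List Int) :
    ∀ (sh : List (List (Int × Int × Int))),
    sh.length = 16 → (∀ R ∈ sh, R.length = 16) →
    (cs.foldl (fun sh c =>
        if 0 ≤ r + yo ∧ r + yo < 16 ∧ 0 ≤ c + xo ∧ c + xo < 16 then
          sh.set (r + yo).toNat ((sh.getD (r + yo).toNat []).set (c + xo).toNat (pvGetV frame r c))
        else sh) sh).length = 16 ∧
    (∀ R ∈ (cs.foldl (fun sh c =>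
        if 0 ≤ r + yo ∧ r + yo < 16 ∧ 0 ≤ c + xo ∧ c + xo < 16 then
          sh.set (r + yo).toNat ((sh.getD (r + yo).toNat []).set (c + xo).toNat (pvGetV frame r c))
        else sh) sh), R.length = 16) ∧
    (∀ i j : Nat, i < 16 → j < 16 →
      ((cs.foldl (fun sh c =>
        if 0 ≤ r + yo ∧ r + yo < 16 ∧ 0 ≤ c + xo ∧ c + xo < 16 then
          sh.set (r + yo).toNat ((sh.getD (r + yo).toNat []).set (c + xo).toNat (pvGetV frame r c))
        else sh) sh).getD i []).getD j (0, 0, 0) =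
        if 0 ≤ r + yo ∧ r + yo < 16 ∧ (i : Int) = r + yo ∧
           (∃ c ∈ cs, 0 ≤ c + xo ∧ c + xo < 16 ∧ (j : Int) = c + xo) then
          pvGetV frame r ((j : Int) - xo)
        else (sh.getD i []).getD j (0, 0, 0)) := by
  induction cs with
  | nil => intro sh h1 h2; refine ⟨h1, h2, ?_⟩; intro i j hi hj; simp
  | cons c cs ih =>
    intro sh h1 h2
    by_cases hP : 0 ≤ r + yo ∧ r + yo < 16 ∧ 0 ≤ c + xo ∧ c + xo < 16
    · set row := sh.getD (r + yo).toNat [] with hrow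
      have hrowmem : row ∈ sh := pv_mem_row sh _ (by omega)
      have hrowlen : row.length = 16 := h2 _ hrowmem
      set sh1 := sh.set (r + yo).toNat (row.set (c + xo).toNat (pvGetV frame r c)) with hsh1
      have h1' : sh1.length = 16 := by simp [hsh1, h1]
      have h2' : ∀ R ∈ sh1, R.length = 16 := by
        intro R hR
        rcases List.mem_or_eq_of_mem_set hR with h | h
        · exact h2 _ h
        · simp [h, hrowlen]
      obtain ⟨g1, g2, g3⟩ := ih sh1 h1' h2'
      refine ⟨?_, ?_, ?_⟩
      · simpa [List.foldl_cons, if_pos hP] using g1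
      · simpa [List.foldl_cons, if_pos hP] using g2
      · intro i j hi hj
        rw [List.foldl_cons, if_pos hP, g3 i j hi hj]
        by_cases hex : 0 ≤ r + yo ∧ r + yo < 16 ∧ (i : Int) = r + yo ∧
            (∃ c' ∈ cs, 0 ≤ c' + xo ∧ c' + xo < 16 ∧ (j : Int) = c' + xo)
        · rw [if_pos hex, if_pos]
          obtain ⟨a, b, d, c', hc', e⟩ := hex
          exact ⟨a, b, d, c', List.mem_cons_of_mem _ hc', e⟩
        · rw [if_neg hex]
          by_cases hhit : (i : Int) = r + yo ∧ (j : Int) = c + xo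
          · have hi' : i = (r + yo).toNat := by omega
            have hj' : j = (c + xo).toNat := by omega
            rw [hsh1, pv_getD_set, if_pos ⟨hi', by omega⟩, pv_getD_set,
              if_pos ⟨hj', by rw [hrowlen]; omega⟩, if_pos]
            · congr 1; omega
            · exact ⟨hP.1, hP.2.1, hhit.1, c, List.mem_cons_self, hP.2.2.1, hP.2.2.2, hhit.2⟩
          · have hcond : ¬(0 ≤ r + yo ∧ r + yo < 16 ∧ (i : Int) = r + yo ∧
                (∃ c' ∈ c :: cs, 0 ≤ c' + xo ∧ c' + xo < 16 ∧ (j : Int) = c' + xo)) := by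
              rintro ⟨a, b, d, c', hc', e1, e2, e3⟩
              rcases List.mem_cons.mp hc' with rfl | hc'
              · exact hhit ⟨d, e3⟩
              · exact hex ⟨a, b, d, c', hc', e1, e2, e3⟩
            rw [if_neg hcond, hsh1, pv_getD_set]
            by_cases hieq : i = (r + yo).toNat ∧ (r + yo).toNat < sh.length
            · rw [if_pos hieq, pv_getD_set, if_neg, hrow, hieq.1]
              rintro ⟨hj', _⟩
              exact hhit ⟨by omega, by omega⟩
            · rw [if_neg hieq]
    · obtain ⟨g1, g2, g3⟩ := ih sh h1 h2
      refine ⟨?_, ?_, ?_⟩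
      · simpa [List.foldl_cons, if_neg hP] using g1
      · simpa [List.foldl_cons, if_neg hP] using g2
      · intro i j hi hj
        rw [List.foldl_cons, if_neg hP, g3 i j hi hj]
        by_cases hex : 0 ≤ r + yo ∧ r + yo < 16 ∧ (i : Int) = r + yo ∧
            (∃ c' ∈ cs, 0 ≤ c' + xo ∧ c' + xo < 16 ∧ (j : Int) = c' + xo)
        · rw [if_pos hex, if_pos]
          obtain ⟨a, b, d, c', hc', e⟩ := hex
          exact ⟨a, b, d, c', List.mem_cons_of_mem _ hc', e⟩
        · rw [if_neg hex, if_neg]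
          rintro ⟨a, b, d, c', hc', e1, e2, e3⟩
          rcases List.mem_cons.mp hc' with rfl | hc'
          · exact hP ⟨a, b, e1, e2⟩
          · exact hex ⟨a, b, d, c', hc', e1, e2, e3⟩

-- outer loop (for r in range(16)) of A, characterised elementwise
lemma pv_outer (frame : List (List (Int × Int × Int))) (xo yo : Int) (rs : List Int) :
    ∀ (sh : List (List (Int × Int × Int))),
    sh.length = 16 → (∀ R ∈ sh, R.length = 16) →
    (rs.foldl (fun sh r =>
      (PySem.List.pyRange 0 16 1).foldl (fun sh c =>
        if 0 ≤ r + yo ∧ r + yo < 16 ∧ 0 ≤ c + xo ∧ c + xo < 16 then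
          sh.set (r + yo).toNat ((sh.getD (r + yo).toNat []).set (c + xo).toNat (pvGetV frame r c))
        else sh) sh) sh).length = 16 ∧
    (∀ R ∈ (rs.foldl (fun sh r =>
      (PySem.List.pyRange 0 16 1).foldl (fun sh c =>
        if 0 ≤ r + yo ∧ r + yo < 16 ∧ 0 ≤ c + xo ∧ c + xo < 16 then
          sh.set (r + yo).toNat ((sh.getD (r + yo).toNat []).set (c + xo).toNat (pvGetV frame r c))
        else sh) sh) sh), R.length = 16) ∧
    (∀ i j : Nat, i < 16 → j < 16 →
      ((rs.foldl (fun sh r =>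
        (PySem.List.pyRange 0 16 1).foldl (fun sh c =>
          if 0 ≤ r + yo ∧ r + yo < 16 ∧ 0 ≤ c + xo ∧ c + xo < 16 then
            sh.set (r + yo).toNat ((sh.getD (r + yo).toNat []).set (c + xo).toNat (pvGetV frame r c))
          else sh) sh) sh).getD i []).getD j (0, 0, 0) =
        if (∃ r ∈ rs, 0 ≤ r + yo ∧ r + yo < 16 ∧ (i : Int) = r + yo) ∧
           0 ≤ (j : Int) - xo ∧ (j : Int) - xo < 16 then
          pvGetV frame ((i : Int) - yo) ((j : Int) - xo)
        else (sh.getD i []).getD j (0, 0, 0)) := by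
  induction rs with
  | nil => intro sh h1 h2; refine ⟨h1, h2, ?_⟩; intro i j hi hj; simp
  | cons r rs ih =>
    intro sh h1 h2
    obtain ⟨g1, g2, g3⟩ := pv_inner frame xo yo r (PySem.List.pyRange 0 16 1) sh h1 h2
    obtain ⟨o1, o2, o3⟩ := ih _ g1 g2
    refine ⟨by simpa using o1, by simpa using o2, ?_⟩
    intro i j hi hj
    rw [List.foldl_cons, o3 i j hi hj]
    by_cases hex : (∃ r' ∈ rs, 0 ≤ r' + yo ∧ r' + yo < 16 ∧ (i : Int) = r' + yo) ∧
        0 ≤ (j : Int) - xo ∧ (j : Int) - xo < 16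
    · rw [if_pos hex, if_pos]
      obtain ⟨⟨r', hr', a⟩, b⟩ := hex
      exact ⟨⟨r', List.mem_cons_of_mem _ hr', a⟩, b⟩
    · rw [if_neg hex, g3 i j hi hj]
      by_cases hhead : 0 ≤ r + yo ∧ r + yo < 16 ∧ (i : Int) = r + yo ∧
          (∃ c ∈ PySem.List.pyRange 0 16 1, 0 ≤ c + xo ∧ c + xo < 16 ∧ (j : Int) = c + xo)
      · rw [if_pos hhead, if_pos]
        · congr 1; omega
        · obtain ⟨a, b, d, c, hc, e1, e2, e3⟩ := hhead
          rw [PySem.List.mem_pyRange_one] at hc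
          exact ⟨⟨r, List.mem_cons_self, a, b, d⟩, by omega, by omega⟩
      · rw [if_neg hhead, if_neg]
        rintro ⟨⟨r', hr', a, b, d⟩, e1, e2⟩
        rcases List.mem_cons.mp hr' with rfl | hr'
        · refine hhead ⟨a, b, d, (j : Int) - xo, ?_, by omega, by omega, by omega⟩
          rw [PySem.List.mem_pyRange_one]; omega
        · exact hex ⟨⟨r', hr', a, b, d⟩, e1, e2⟩

lemma pv_blank_getD : ∀ i j : Fin 16,
    (((List.replicate 16 (List.replicate 16 ((0, 0, 0) : Int × Int × Int))).getD i.val []).getD j.val (0, 0, 0)) = (0, 0, 0) := by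
  decide

-- B's horizontal row shift, characterised elementwise (for |xo| < 16 and a long-enough row)
lemma pv_hshift_char (xo : Int) (row : List (Int × Int × Int))
    (hx1 : -16 < xo) (hx2 : xo < 16)
    (hrow : ∀ c : Nat, c < 16 → 0 ≤ (c : Int) + xo → (c : Int) + xo < 16 → c < row.length) :
    (pvHShift xo row).length = 16 ∧
    (∀ j : Nat, j < 16 → (pvHShift xo row).getD j (0, 0, 0) =
      if 0 ≤ (j : Int) - xo ∧ (j : Int) - xo < 16 then
        row.getD ((j : Int) - xo).toNat (0, 0, 0)
      else (0, 0, 0)) := by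
  by_cases hx : 0 ≤ xo
  · have hneed : ((15 : Int) - xo).toNat < row.length := by
      apply hrow _ (by omega) (by omega) (by omega)
    have hslice : PySem.List.slice row none (some (16 - xo)) = row.take (16 - xo).toNat :=
      PySem.List.slice_to row (by omega)
    have hlen : (row.take (16 - xo).toNat).length = (16 - xo).toNat := by
      simp; omega
    constructor
    · simp [pvHShift, if_pos hx, hslice, hlen]; omega
    · intro j hj
      rw [pvHShift, if_pos hx, hslice, pv_getD_append]
      simp only [List.length_replicate]
      by_cases hjx : j < xo.toNat
      · rw [if_pos hjx, pv_getD_replicate, if_pos hjx, if_neg (by omega)]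
      · rw [if_neg hjx, pv_getD_take _ _ _ _ (by omega), if_pos (by omega)]
        congr 1; omega
  · have hneed : (15 : Nat) < row.length := by
      apply hrow 15 (by omega) (by omega) (by omega)
    have hslice : PySem.List.slice row (some (-xo)) (some 16) =
        (row.drop (-xo).toNat).take ((16 : Int).toNat - (-xo).toNat) :=
      PySem.List.slice_toNat row (by omega) (by omega)
    have hlen : ((row.drop (-xo).toNat).take ((16 : Int).toNat - (-xo).toNat)).length =
        (16 : Int).toNat - (-xo).toNat := by
      simp; omega
    constructor
    · simp [pvHShift, if_neg hx, hslice]; omega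
    · intro j hj
      rw [pvHShift, if_neg hx, hslice, pv_getD_append, hlen]
      by_cases hjx : j < (16 : Int).toNat - (-xo).toNat
      · rw [if_pos hjx, pv_getD_take _ _ _ _ hjx, pv_getD_drop, if_pos (by omega)]
        congr 1; omega
      · rw [if_neg hjx, pv_getD_replicate, if_pos (by omega), if_neg (by omega)]

-- B's grid under Pre_: lengths 16 and the gather value at every cell
lemma pv_alt_char (frame : List (List (Int × Int × Int))) (xo yo : Int)
    (hpre : Pre_shift_frame_py frame xo yo) :
    (shift_frame_py_alt frame xo yo).length = 16 ∧
    (∀ R ∈ shift_frame_py_alt frame xo yo, R.length = 16) ∧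
    (∀ i j : Nat, i < 16 → j < 16 →
      ((shift_frame_py_alt frame xo yo).getD i []).getD j (0, 0, 0) =
        if 0 ≤ (i : Int) - yo ∧ (i : Int) - yo < 16 ∧ 0 ≤ (j : Int) - xo ∧ (j : Int) - xo < 16 then
          (frame.getD ((i : Int) - yo).toNat []).getD ((j : Int) - xo).toNat (0, 0, 0)
        else (0, 0, 0)) := by
  by_cases hoff : 16 ≤ xo ∨ xo ≤ -16 ∨ 16 ≤ yo ∨ yo ≤ -16
  · rw [shift_frame_py_alt, if_pos hoff]
    refine ⟨by simp, ?_, ?_⟩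
    · intro R hR; rw [List.eq_of_mem_replicate hR]; simp [pvBlankRow]
    · intro i j hi hj
      rw [pv_getD_replicate, if_pos hi, pvBlankRow, pv_getD_replicate, if_pos hj, if_neg]
      omega
  · push Not at hoff
    obtain ⟨hx1, hx2, hy1, hy2⟩ := hoff
    -- a column witness inside the grid, to extract row-existence facts from Pre_
    have hcw : ∃ c : Fin 16, 0 ≤ (c.val : Int) + xo ∧ (c.val : Int) + xo < 16 := by
      by_cases h : 0 ≤ xo
      · exact ⟨⟨0, by omega⟩, by simp; omega⟩
      · exact ⟨⟨(-xo).toNat, by omega⟩, by constructor <;> simp <;> omega⟩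
    obtain ⟨cw, hcw1, hcw2⟩ := hcw
    have hrowlen : ∀ r : Nat, r < 16 → 0 ≤ (r : Int) + yo → (r : Int) + yo < 16 →
        r < frame.length := by
      intro r h1 h2 h3
      exact (hpre ⟨r, h1⟩ cw ⟨h2, h3, hcw1, hcw2⟩).1
    have hcell : ∀ r : Nat, r < 16 → 0 ≤ (r : Int) + yo → (r : Int) + yo < 16 →
        ∀ c : Nat, c < 16 → 0 ≤ (c : Int) + xo → (c : Int) + xo < 16 →
        c < (frame.getD r []).length := by
      intro r h1 h2 h3 c h4 h5 h6
      exact (hpre ⟨r, h1⟩ ⟨c, h4⟩ ⟨h2, h3, h5, h6⟩).2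
    -- a row picked up by the vertical shift satisfies pv_hshift_char's hypothesis
    have hshift_of : ∀ r : Nat, r < 16 → 0 ≤ (r : Int) + yo → (r : Int) + yo < 16 →
        (pvHShift xo (frame.getD r [])).length = 16 ∧
        (∀ j : Nat, j < 16 → (pvHShift xo (frame.getD r [])).getD j (0, 0, 0) =
          if 0 ≤ (j : Int) - xo ∧ (j : Int) - xo < 16 then
            (frame.getD r []).getD ((j : Int) - xo).toNat (0, 0, 0)
          else (0, 0, 0)) := by
      intro r h1 h2 h3
      exact pv_hshift_char xo _ (by omega) (by omega) (hcell r h1 h2 h3)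
    by_cases hy : 0 ≤ yo
    · have hflen : ((16 : Int) - yo).toNat ≤ frame.length := by
        have := hrowlen ((15 : Int) - yo).toNat (by omega) (by omega) (by omega)
        omega
      have hslice : PySem.List.slice frame none (some (16 - yo)) = frame.take (16 - yo).toNat :=
        PySem.List.slice_to frame (by omega)
      have htlen : (frame.take (16 - yo).toNat).length = (16 - yo).toNat := by simp; omega
      rw [shift_frame_py_alt, if_neg (by omega), if_pos hy, hslice]
      refine ⟨by simp; omega, ?_, ?_⟩
      · intro R hR
        rcases List.mem_append.mp hR with h | h
        · rw [List.eq_of_mem_replicate h]; simp [pvBlankRow]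
        · obtain ⟨row, hrow, rfl⟩ := List.mem_map.mp h
          obtain ⟨k, hk, hrowk⟩ := List.getElem_of_mem hrow
          have hk16 : k < (16 - yo).toNat := by
            have := List.length_take_le (16 - yo).toNat frame; omega
          have hkf : k < frame.length := by omega
          have : row = frame.getD k [] := by
            rw [List.getD_eq_getElem _ _ hkf, ← hrowk, List.getElem_take]
          rw [this]
          exact (hshift_of k (by omega) (by omega) (by omega)).1
      · intro i j hi hj
        rw [pv_getD_append, List.length_replicate]
        by_cases hiy : i < yo.toNat
        · rw [if_pos hiy, pv_getD_replicate, if_pos hiy, pvBlankRow, pv_getD_replicate,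
            if_pos hj, if_neg (by omega)]
        · rw [if_neg hiy]
          have hk16 : i - yo.toNat < (16 - yo).toNat := by omega
          have hkf : i - yo.toNat < frame.length := by omega
          have hmap : ((frame.take (16 - yo).toNat).map (pvHShift xo)).getD (i - yo.toNat) [] =
              pvHShift xo (frame.getD (i - yo.toNat) []) := by
            rw [List.getD_eq_getElem _ _ (by simp; omega), List.getElem_map,
              List.getElem_take, List.getD_eq_getElem _ _ hkf]
          rw [hmap, (hshift_of (i - yo.toNat) (by omega) (by omega) (by omega)).2 j hj]
          by_cases hjx : 0 ≤ (j : Int) - xo ∧ (j : Int) - xo < 16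
          · rw [if_pos hjx, if_pos ⟨by omega, by omega, hjx⟩]
            congr 2; omega
          · rw [if_neg hjx, if_neg (by omega)]
    · have hflen : (16 : Nat) ≤ frame.length := by
        have := hrowlen 15 (by omega) (by omega) (by omega)
        omega
      have hslice : PySem.List.slice frame (some (-yo)) (some 16) =
          (frame.drop (-yo).toNat).take ((16 : Int).toNat - (-yo).toNat) :=
        PySem.List.slice_toNat frame (by omega) (by omega)
      have htlen : ((frame.drop (-yo).toNat).take ((16 : Int).toNat - (-yo).toNat)).length =
          (16 : Int).toNat - (-yo).toNat := by simp; omega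
      rw [shift_frame_py_alt, if_neg (by omega), if_neg hy, hslice]
      refine ⟨by simp; omega, ?_, ?_⟩
      · intro R hR
        rcases List.mem_append.mp hR with h | h
        · obtain ⟨row, hrow, rfl⟩ := List.mem_map.mp h
          obtain ⟨k, hk, hrowk⟩ := List.getElem_of_mem hrow
          have hk16 : k < (16 : Int).toNat - (-yo).toNat := by
            have := List.length_take_le ((16 : Int).toNat - (-yo).toNat) (frame.drop (-yo).toNat)
            omega
          have hkf : (-yo).toNat + k < frame.length := by omega
          have : row = frame.getD ((-yo).toNat + k) [] := by
            rw [List.getD_eq_getElem _ _ hkf, ← hrowk, List.getElem_take, List.getElem_drop]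
          rw [this]
          exact (hshift_of ((-yo).toNat + k) (by omega) (by omega) (by omega)).1
        · rw [List.eq_of_mem_replicate h]; simp [pvBlankRow]
      · intro i j hi hj
        rw [pv_getD_append, List.length_map, htlen]
        by_cases hik : i < (16 : Int).toNat - (-yo).toNat
        · rw [if_pos hik]
          have hkf : (-yo).toNat + i < frame.length := by omega
          have hmap : (((frame.drop (-yo).toNat).take ((16 : Int).toNat - (-yo).toNat)).map
              (pvHShift xo)).getD i [] = pvHShift xo (frame.getD ((-yo).toNat + i) []) := by
            rw [List.getD_eq_getElem _ _ (by simp; omega), List.getElem_map,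
              List.getElem_take, List.getElem_drop, List.getD_eq_getElem _ _ hkf]
          rw [hmap, (hshift_of ((-yo).toNat + i) (by omega) (by omega) (by omega)).2 j hj]
          by_cases hjx : 0 ≤ (j : Int) - xo ∧ (j : Int) - xo < 16
          · rw [if_pos hjx, if_pos ⟨by omega, by omega, hjx⟩]
            congr 2; omega
          · rw [if_neg hjx, if_neg (by omega)]
        · rw [if_neg hik, pv_getD_replicate, if_pos (by omega), pvBlankRow,
            pv_getD_replicate, if_pos hj, if_neg (by omega)]

-- ===== VERDICT (by name: the statement is the Claim_ definition above) =====
theorem shift_frame_py_spec : Claim_equal_shift_frame_py := by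
  intro frame xo yo _ hpre
  unfold Spec_shift_frame_py
  have hb1 : (List.replicate 16 (List.replicate 16 ((0, 0, 0) : Int × Int × Int))).length = 16 := by simp
  have hb2 : ∀ R ∈ List.replicate 16 (List.replicate 16 ((0, 0, 0) : Int × Int × Int)), R.length = 16 := by
    intro R hR; rw [List.eq_of_mem_replicate hR]; simp
  obtain ⟨o1, o2, o3⟩ := pv_outer frame xo yo (PySem.List.pyRange 0 16 1) _ hb1 hb2
  obtain ⟨a1, a2, a3⟩ := pv_alt_char frame xo yo hpre
  have hA1 : (shift_frame_py frame xo yo).length = 16 := o1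
  apply List.ext_getElem (by rw [hA1, a1])
  intro i hi hi'
  have hi16 : i < 16 := by omega
  apply List.ext_getElem
  · have hm1 : (shift_frame_py frame xo yo)[i] ∈ shift_frame_py frame xo yo := List.getElem_mem _
    have hm2 : (shift_frame_py_alt frame xo yo)[i] ∈ shift_frame_py_alt frame xo yo := List.getElem_mem _
    exact (o2 _ hm1).trans (a2 _ hm2).symm
  intro j hj hj'
  have hj16 : j < 16 := by
    have := o2 _ (List.getElem_mem hi)
    omega
  have key : ((shift_frame_py frame xo yo).getD i []).getD j (0, 0, 0) =
      (((shift_frame_py_alt frame xo yo).getD i []).getD j (0, 0, 0)) := by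
    rw [a3 i j hi16 hj16]
    unfold shift_frame_py
    rw [o3 i j hi16 hj16, pv_blank_getD ⟨i, hi16⟩ ⟨j, hj16⟩]
    by_cases hc : 0 ≤ (i : Int) - yo ∧ (i : Int) - yo < 16 ∧ 0 ≤ (j : Int) - xo ∧ (j : Int) - xo < 16
    · rw [if_pos hc, if_pos, pv_getV_nonneg frame _ _ (by omega) (by omega)]
      refine ⟨⟨(i : Int) - yo, ?_, by omega, by omega, by omega⟩, by omega, by omega⟩
      rw [PySem.List.mem_pyRange_one]; omega
    · rw [if_neg hc, if_neg]
      rintro ⟨⟨r', hr', a, b, d⟩, e1, e2⟩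
      rw [PySem.List.mem_pyRange_one] at hr'
      exact hc ⟨by omega, by omega, by omega, by omega⟩
  rwa [List.getD_eq_getElem _ [] hi, List.getD_eq_getElem _ _ hj, List.getD_eq_getElem _ [] hi', List.getD_eq_getElem _ _ hj'] at key
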